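-- pv_equiv track=rewrite | github.com/jano31415/codejam | codejam/y2021/qual/probb.py | solve_pos
-- ===== SOURCE A (Python) =====
-- def solve_pos(X,Y,art):
--     current_to_xy = {"J":Y, "C":X}
--     if "J" not in art:
--         return 0
--     if "C" not in art:
--         return 0
--     current = art[0]
--     tot = 0
--     for s in art:
--         if s == "?":
--             continue
--         if s == current:
--             continue
--         else:
--             if current == "?":
--                 current = s
--             else:
--                 tot += current_to_xy[current]
--                 current = s
--     return tot
-- ===== SOURCE B (Python) =====
-- def solve_pos(X, Y, art):
--     f = art.replace("?", "")
--     return Y * f.count("JC") + X * f.count("CJ")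
-- ===== Notes on version B (the rewrite author's own statement) =====
-- stated objective: alternative
-- what changed: Replaces the character-by-character current-state machine (presence guards, a cost dict and a running state/accumulator) by stripping '?' with str.replace and counting the 'JC' and 'CJ' substrings: Y*f.count('JC') + X*f.count('CJ').
-- outside the precondition, e.g. on solve_pos(1, 2, 'JCX'): A returns 3, B returns 2
import Mathlib
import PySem

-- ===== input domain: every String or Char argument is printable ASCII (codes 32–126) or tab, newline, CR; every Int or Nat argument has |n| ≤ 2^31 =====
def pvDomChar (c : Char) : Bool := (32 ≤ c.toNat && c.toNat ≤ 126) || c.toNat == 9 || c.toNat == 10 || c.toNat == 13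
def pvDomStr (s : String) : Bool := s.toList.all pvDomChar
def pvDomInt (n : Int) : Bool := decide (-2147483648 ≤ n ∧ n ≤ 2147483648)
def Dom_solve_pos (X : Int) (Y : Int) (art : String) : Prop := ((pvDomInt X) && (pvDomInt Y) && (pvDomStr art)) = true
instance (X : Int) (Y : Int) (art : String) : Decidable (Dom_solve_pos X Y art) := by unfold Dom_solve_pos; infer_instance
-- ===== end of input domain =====

-- B strips '?' with str.replace and counts the 'JC'/'CJ' substrings instead of running A's
-- per-character current-state machine (guards, cost dict, running state); same asymptotic cost.

-- ===== PORT A =====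
-- the for-loop of A: state (current, tot); 'none' models the KeyError raised by current_to_xy[current]
def solveAux (X : Int) (Y : Int) : List Char → Char → Int → Option Int
  | [], _, tot => some tot
  | s :: rest, current, tot =>
    if s = '?' then solveAux X Y rest current tot
    else if s = current then solveAux X Y rest current tot
    else if current = '?' then solveAux X Y rest s tot
    else
      match (PySem.Dict.ofList [('J', Y), ('C', X)]).get? current with
      | none => none                                   -- KeyError (outside Pre_)
      | some v => solveAux X Y rest s (tot + v)

def solve_pos (X : Int) (Y : Int) (art : String) : Int :=
  if PySem.Str.isIn "J" art = false then 0
  else if PySem.Str.isIn "C" art = false then 0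
  else
    match PySem.Str.pyGet? art 0 with
    | none => 0                                        -- unreachable: art contains 'J' here
    | some current => (solveAux X Y art.toList current 0).getD 0   -- none = KeyError, excluded by Pre_

-- ===== PORT B =====
def solve_pos_alt (X : Int) (Y : Int) (art : String) : Int :=
  let f := PySem.Str.replace art "?" ""
  Y * (PySem.Str.count f "JC" : Int) + X * (PySem.Str.count f "CJ" : Int)

-- ===== PRECONDITION & SPEC =====
-- Pre_ excludes strings that contain both 'J' and 'C' together with a stray character outside
-- {J,C,?} (outside the problem's alphabet): there A either raises KeyError or returns an
-- accidental transition cost charged for leaving the stray character.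
def Pre_solve_pos (X : Int) (Y : Int) (art : String) : Prop :=
  ('J' ∈ art.toList ∧ 'C' ∈ art.toList) →
    (art.toList.all (fun c => c == 'J' || c == 'C' || c == '?')) = true
instance (X : Int) (Y : Int) (art : String) : Decidable (Pre_solve_pos X Y art) := by
  unfold Pre_solve_pos; infer_instance

def pvWitness_solve_pos : Int × Int × String := (3, 4, "C??CJ")

def Spec_solve_pos (X : Int) (Y : Int) (art : String) (out : Int) : Prop := out = solve_pos_alt X Y art
instance (X : Int) (Y : Int) (art : String) (out : Int) : Decidable (Spec_solve_pos X Y art out) := by unfold Spec_solve_pos; infer_instance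

-- ===== CLAIM (what is proved, stated in full; the proofs are below) =====
def Claim_equal_solve_pos : Prop := ∀ (X : Int) (Y : Int) (art : String), Dom_solve_pos X Y art → Pre_solve_pos X Y art → Spec_solve_pos X Y art (solve_pos X Y art)

-- ===== LEMMAS AND PROOFS =====

-- number of adjacent pairs (a, b) in l (B's substring counts reduce to this for a ≠ b)
def pairCount (a b : Char) (l : List Char) : Nat := (l.zip l.tail).count (a, b)

theorem singleton_infix_iff (a : Char) (l : List Char) : [a] <:+: l ↔ a ∈ l := by
  constructor
  · rintro ⟨s, t, rfl⟩; simp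
  · intro h
    obtain ⟨s, t, rfl⟩ := List.append_of_mem h
    exact ⟨s, t, by simp⟩

theorem replace_go_filter : ∀ (fuel : Nat) (l acc : List Char), l.length ≤ fuel →
    PySem.Chars.replace.go ['?'] [] fuel l acc = acc.reverse ++ l.filter (fun c => c ≠ '?') := by
  intro fuel
  induction fuel with
  | zero =>
    intro l acc h
    have : l = [] := List.eq_nil_of_length_eq_zero (Nat.le_zero.mp h)
    subst this; simp [PySem.Chars.replace.go]
  | succ n ih =>
    intro l acc h
    match l with
    | [] => simp [PySem.Chars.replace.go]
    | c :: t =>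
      rw [PySem.Chars.replace.go]
      simp only [List.isPrefixOf, Bool.and_true, List.length_cons] at *
      by_cases hc : c = '?'
      · subst hc
        simp only [beq_self_eq_true, if_pos, List.length_nil, Nat.zero_add,
          List.drop_succ_cons, List.drop_zero, List.reverse_nil, List.nil_append]
        rw [ih _ _ (by omega)]
        simp
      · have hbe : ('?' == c) = false := by simp [beq_eq_false_iff_ne]; exact fun e => hc e.symm
        rw [if_neg (by simp [hbe]), ih _ _ (by omega)]
        simp [hc]

theorem replace_eq_filter (l : List Char) :
    PySem.Chars.replace l ['?'] [] = l.filter (fun c => c ≠ '?') := by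
  rw [PySem.Chars.replace]
  simp only [List.isEmpty_cons, if_neg Bool.false_ne_true]
  simpa using replace_go_filter l.length l [] le_rfl

theorem pairCount_cons_cons (a b x y : Char) (t : List Char) :
    pairCount a b (x :: y :: t) = (if (x, y) = (a, b) then 1 else 0) + pairCount a b (y :: t) := by
  simp only [pairCount, List.tail_cons, List.zip_cons_cons, List.count_cons]
  split_ifs with h <;> simp_all <;> omega

theorem pairCount_cons_b (a b : Char) (hab : a ≠ b) (t : List Char) :
    pairCount a b (b :: t) = pairCount a b t := by
  cases t with
  | nil => simp [pairCount]
  | cons y t2 =>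
    rw [pairCount_cons_cons]
    have : ¬ ((b, y) = (a, b)) := by
      intro h; exact hab (by injection h with h1 h2; rw [h1])
    simp [this]

theorem count_go_pairCount (a b : Char) (hab : a ≠ b) :
    ∀ (fuel : Nat) (l : List Char) (acc : Nat), l.length ≤ fuel →
    PySem.Chars.count.go [a, b] fuel l acc = acc + pairCount a b l := by
  intro fuel
  induction fuel with
  | zero =>
    intro l acc h
    have : l = [] := List.eq_nil_of_length_eq_zero (Nat.le_zero.mp h)
    subst this; simp [PySem.Chars.count.go, pairCount]
  | succ n ih =>
    intro l acc h
    match l with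
    | [] => simp [PySem.Chars.count.go, pairCount]
    | c :: t =>
      rw [PySem.Chars.count.go]
      by_cases hp : ([a, b].isPrefixOf (c :: t)) = true
      · rw [if_pos hp]
        obtain ⟨t2, ht⟩ := (List.isPrefixOf_iff_prefix.mp hp)
        have hc : c = a ∧ t = b :: t2 := by
          cases ht; exact ⟨rfl, rfl⟩
        obtain ⟨rfl, rfl⟩ := hc
        simp only [List.length_cons, List.drop_succ_cons]
        rw [ih _ _ (by simp at h ⊢; omega)]
        rw [pairCount_cons_cons, pairCount_cons_b _ _ hab]
        simp; omega
      · rw [if_neg hp, ih _ _ (by simp at h ⊢; omega)]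
        cases t with
        | nil => simp [pairCount]
        | cons y t2 =>
          rw [pairCount_cons_cons]
          have : ¬ ((c, y) = (a, b)) := by
            intro he
            apply hp
            injection he with h1 h2
            subst h1; subst h2
            exact List.isPrefixOf_iff_prefix.mpr ⟨t2, rfl⟩
          simp [this]

theorem count_eq_pairCount (a b : Char) (hab : a ≠ b) (l : List Char) :
    PySem.Chars.count l [a, b] = pairCount a b l := by
  rw [PySem.Chars.count]
  simp only [List.isEmpty_cons, if_neg Bool.false_ne_true]
  simpa using count_go_pairCount a b hab l.length l 0 le_rfl

theorem pairCount_zero_left (a b : Char) (l : List Char) (h : a ∉ l) : pairCount a b l = 0 := by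
  rw [pairCount, List.count_eq_zero]
  intro hm
  exact h ((List.of_mem_zip hm).1)

theorem pairCount_zero_right (a b : Char) (l : List Char) (h : b ∉ l) : pairCount a b l = 0 := by
  rw [pairCount, List.count_eq_zero]
  intro hm
  exact h (List.mem_of_mem_tail (List.of_mem_zip hm).2)

theorem solveAux_filter (X Y : Int) : ∀ (l : List Char) (cur : Char) (tot : Int),
    solveAux X Y l cur tot = solveAux X Y (l.filter (fun c => c ≠ '?')) cur tot := by
  intro l
  induction l with
  | nil => intro cur tot; simp
  | cons s rest ih =>
    intro cur tot
    by_cases hs : s = '?'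
    · subst hs
      rw [show ((('?' :: rest).filter (fun c => c ≠ '?')) = rest.filter (fun c => c ≠ '?')) from by simp]
      rw [solveAux, if_pos rfl]
      exact ih cur tot
    · rw [show ((s :: rest).filter (fun c => c ≠ '?') = s :: rest.filter (fun c => c ≠ '?')) from by simp [hs]]
      rw [solveAux, solveAux, if_neg hs, if_neg hs]
      by_cases h1 : s = cur
      · rw [if_pos h1, if_pos h1]; exact ih cur tot
      · rw [if_neg h1, if_neg h1]
        by_cases h2 : cur = '?'
        · rw [if_pos h2, if_pos h2]; exact ih s tot
        · rw [if_neg h2, if_neg h2]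
          cases hget : (PySem.Dict.ofList [('J', Y), ('C', X)]).get? cur with
          | none => rfl
          | some v => exact ih s (tot + v)

theorem dict_get_J (X Y : Int) : (PySem.Dict.ofList [('J', Y), ('C', X)]).get? 'J' = some Y := by
  simp [PySem.Dict.ofList, PySem.Dict.get?, PySem.Dict.insert, PySem.Dict.empty, PySem.Dict.contains,
        PySem.Dict.update, List.find?]

theorem dict_get_C (X Y : Int) : (PySem.Dict.ofList [('J', Y), ('C', X)]).get? 'C' = some X := by
  simp [PySem.Dict.ofList, PySem.Dict.get?, PySem.Dict.insert, PySem.Dict.empty, PySem.Dict.contains,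
        PySem.Dict.update, List.find?]

theorem solveAux_JC (X Y : Int) : ∀ (l : List Char), (∀ c ∈ l, c = 'J' ∨ c = 'C') →
    ∀ (cur : Char), (cur = 'J' ∨ cur = 'C') → ∀ (tot : Int),
    solveAux X Y l cur tot =
      some (tot + Y * (pairCount 'J' 'C' (cur :: l) : Int) + X * (pairCount 'C' 'J' (cur :: l) : Int)) := by
  intro l
  induction l with
  | nil =>
    intro _ cur _ tot
    simp [solveAux, pairCount]
  | cons s rest ih =>
    intro hall cur hcur tot
    have hs : s = 'J' ∨ s = 'C' := hall s (by simp)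
    have hrest : ∀ c ∈ rest, c = 'J' ∨ c = 'C' := fun c hc => hall c (by simp [hc])
    have hsq : s ≠ '?' := by rcases hs with rfl | rfl <;> decide
    have hcq : cur ≠ '?' := by rcases hcur with rfl | rfl <;> decide
    rw [solveAux, if_neg hsq]
    by_cases h1 : s = cur
    · rw [if_pos h1, ih hrest cur hcur tot]
      subst h1
      have e1 : pairCount 'J' 'C' (s :: s :: rest) = pairCount 'J' 'C' (s :: rest) := by
        rw [pairCount_cons_cons]
        have : ¬ ((s, s) = ('J', 'C')) := by
          intro h; injection h with h1 h2; subst h1; exact absurd h2 (by decide)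
        simp [this]
      have e2 : pairCount 'C' 'J' (s :: s :: rest) = pairCount 'C' 'J' (s :: rest) := by
        rw [pairCount_cons_cons]
        have : ¬ ((s, s) = ('C', 'J')) := by
          intro h; injection h with h1 h2; subst h1; exact absurd h2 (by decide)
        simp [this]
      rw [e1, e2]
    · rw [if_neg h1, if_neg hcq]
      rcases hcur with rfl | rfl
      · -- cur = 'J', so s = 'C'
        have hsC : s = 'C' := hs.resolve_left h1
        subst hsC
        rw [dict_get_J]
        show solveAux X Y rest 'C' (tot + Y) = _
        rw [ih hrest 'C' (Or.inr rfl) (tot + Y)]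
        rw [pairCount_cons_cons, pairCount_cons_cons]
        simp only [show (('J','C') = ('J','C')) from rfl, if_pos]
        have : ¬ (('J','C') = ('C','J')) := by decide
        rw [if_neg this]
        push_cast
        ring_nf
      · -- cur = 'C', so s = 'J'
        have hsJ : s = 'J' := hs.resolve_right h1
        subst hsJ
        rw [dict_get_C]
        show solveAux X Y rest 'J' (tot + X) = _
        rw [ih hrest 'J' (Or.inl rfl) (tot + X)]
        rw [pairCount_cons_cons, pairCount_cons_cons]
        have h2 : ¬ (('C','J') = ('J','C')) := by decide
        rw [if_neg h2]
        simp only [show (('C','J') = ('C','J')) from rfl, if_pos]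
        push_cast
        ring_nf

-- the loop of A on a non-empty string whose chars lie in {J, C, ?}, started as A starts it
theorem solve_core (X Y : Int) (a0 : Char) (t : List Char)
    (hJm : 'J' ∈ a0 :: t)
    (hall : ∀ c ∈ a0 :: t, c = 'J' ∨ c = 'C' ∨ c = '?') :
    (solveAux X Y ((a0 :: t).filter (fun c => c ≠ '?')) a0 0).getD 0
      = Y * (pairCount 'J' 'C' ((a0 :: t).filter (fun c => c ≠ '?')) : Int)
      + X * (pairCount 'C' 'J' ((a0 :: t).filter (fun c => c ≠ '?')) : Int) := by
  have hfall : ∀ c ∈ (a0 :: t).filter (fun c => c ≠ '?'), c = 'J' ∨ c = 'C' := by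
    intro c hc
    have h1 := List.mem_of_mem_filter hc
    have h2 : c ≠ '?' := by simpa using List.of_mem_filter hc
    rcases hall c h1 with h | h | h
    · exact Or.inl h
    · exact Or.inr h
    · exact absurd h h2
  by_cases ha0 : a0 = '?'
  · subst ha0
    have hfil : ('?' :: t).filter (fun c => c ≠ '?') = t.filter (fun c => c ≠ '?') := by simp
    rw [hfil]
    have hfall' : ∀ c ∈ t.filter (fun c => c ≠ '?'), c = 'J' ∨ c = 'C' := by
      intro c hc; exact hfall c (by rw [hfil]; exact hc)
    have hJt : 'J' ∈ t := by
      rcases List.mem_cons.mp hJm with h | h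
      · exact absurd h (by decide)
      · exact h
    have hJf : 'J' ∈ t.filter (fun c => c ≠ '?') := List.mem_filter.mpr ⟨hJt, by decide⟩
    obtain ⟨h0, t2, hft⟩ := List.exists_cons_of_ne_nil (List.ne_nil_of_mem hJf)
    rw [hft]
    rw [hft] at hfall'
    have hh0q : h0 ≠ '?' := by
      rcases hfall' h0 (by simp) with rfl | rfl <;> decide
    rw [solveAux, if_neg hh0q, if_neg hh0q, if_pos rfl]
    rw [solveAux_JC X Y t2 (fun c hc => hfall' c (by simp [hc])) h0 (hfall' h0 (by simp)) 0]
    simp only [Option.getD_some]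
    push_cast
    ring
  · have hfil : (a0 :: t).filter (fun c => c ≠ '?') = a0 :: t.filter (fun c => c ≠ '?') := by
      simp [ha0]
    rw [hfil]
    have ha0JC : a0 = 'J' ∨ a0 = 'C' := hfall a0 (by rw [hfil]; simp)
    have hsub : ∀ c ∈ t.filter (fun c => c ≠ '?'), c = 'J' ∨ c = 'C' := by
      intro c hc
      exact hfall c (by rw [hfil]; exact List.mem_cons_of_mem _ hc)
    rw [solveAux, if_neg ha0, if_pos rfl]
    rw [solveAux_JC X Y (t.filter (fun c => c ≠ '?')) hsub a0 ha0JC 0]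
    simp only [Option.getD_some]
    push_cast
    ring

-- ===== VERDICT (by name: the statement is the Claim_ definition above) =====
theorem solve_pos_spec : Claim_equal_solve_pos := by
  intro X Y art _ hpre
  unfold Spec_solve_pos
  have hBJ : PySem.Str.count (PySem.Str.replace art "?" "") "JC"
      = pairCount 'J' 'C' (art.toList.filter (fun c => c ≠ '?')) := by
    rw [PySem.Str.count_eq]
    rw [show (PySem.Str.replace art "?" "").toList = PySem.Chars.replace art.toList ['?'] [] from by
      simp [PySem.Str.toList_replace]]
    rw [replace_eq_filter]
    exact count_eq_pairCount 'J' 'C' (by decide) _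
  have hBC : PySem.Str.count (PySem.Str.replace art "?" "") "CJ"
      = pairCount 'C' 'J' (art.toList.filter (fun c => c ≠ '?')) := by
    rw [PySem.Str.count_eq]
    rw [show (PySem.Str.replace art "?" "").toList = PySem.Chars.replace art.toList ['?'] [] from by
      simp [PySem.Str.toList_replace]]
    rw [replace_eq_filter]
    exact count_eq_pairCount 'C' 'J' (by decide) _
  simp only [solve_pos, solve_pos_alt]
  rw [hBJ, hBC]
  by_cases hJm : 'J' ∈ art.toList
  · by_cases hCm : 'C' ∈ art.toList
    · -- both present: the guards fall through and the loop runs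
      have hJ : PySem.Chars.isIn ['J'] art.toList = true :=
        (PySem.Chars.isIn_iff_infix _ _).mpr ((singleton_infix_iff _ _).mpr hJm)
      have hC : PySem.Chars.isIn ['C'] art.toList = true :=
        (PySem.Chars.isIn_iff_infix _ _).mpr ((singleton_infix_iff _ _).mpr hCm)
      rw [if_neg (by simp [hJ]), if_neg (by simp [hC])]
      obtain ⟨a0, t, hL⟩ : ∃ a0 t, art.toList = a0 :: t := by
        cases hA : art.toList with
        | nil => rw [hA] at hJm; simp at hJm
        | cons a t => exact ⟨a, t, rfl⟩
      have hg : PySem.Str.pyGet? art 0 = some a0 := by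
        simp [PySem.List.pyGet?, PySem.List.pyIdx?, hL]
      rw [hg]
      show (solveAux X Y art.toList a0 0).getD 0 = _
      rw [solveAux_filter, hL]
      have hall : ∀ c ∈ art.toList, c = 'J' ∨ c = 'C' ∨ c = '?' := by
        intro c hc
        have := List.all_eq_true.mp (hpre ⟨hJm, hCm⟩) c hc
        simpa [or_assoc] using this
      exact solve_core X Y a0 t (hL ▸ hJm) (hL ▸ hall)
    · -- no 'C': A returns 0 via its guard, B counts nothing
      have hC : PySem.Str.isIn "C" art = false := by
        cases hb : PySem.Str.isIn "C" art
        · rfl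
        · exact absurd ((singleton_infix_iff _ _).mp ((PySem.Str.isIn_iff_infix _ _).mp hb)) hCm
      have hCf : 'C' ∉ art.toList.filter (fun c => c ≠ '?') :=
        fun hm => hCm (List.mem_of_mem_filter hm)
      rw [pairCount_zero_right _ _ _ hCf, pairCount_zero_left _ _ _ hCf]
      split_ifs <;> simp
  · -- no 'J': A returns 0 via its guard, B counts nothing
    have hJ : PySem.Str.isIn "J" art = false := by
      cases hb : PySem.Str.isIn "J" art
      · rfl
      · exact absurd ((singleton_infix_iff _ _).mp ((PySem.Str.isIn_iff_infix _ _).mp hb)) hJm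
    have hJf : 'J' ∉ art.toList.filter (fun c => c ≠ '?') :=
      fun hm => hJm (List.mem_of_mem_filter hm)
    rw [pairCount_zero_left _ _ _ hJf, pairCount_zero_right _ _ _ hJf]
    rw [if_pos hJ]
    simp
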